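-- pv_equiv track=rewrite | github.com/jgerega107/cs115 | python/labs/gameoflife/life.py | innerCells
-- ===== SOURCE A (Python) =====
-- def createOneRow(width):
--     """Returns one row of zeros of width "width"...
--        You should use this in your
--        createBoard(width, height) function."""
--     row = []
--     for col in range(width):
--         row += [0]
--     return row
--
-- def createBoard(width, height):
--     arr = []
--     for row in range(height):
--         arr += [createOneRow(width)]
--     return arr
--
-- def innerCells(width, height):
--     A = createBoard(width, height)
--     for row in range(1, height-1):
--         for col in range(1, width-1):
--             if 1 <= row <= height-1:
--                 A[row][col] = 1
--             else:
--                 A[row][col] = 0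
--
--     return A
-- ===== SOURCE B (Python) =====
-- def innerCells(width, height):
--     board = []
--     for row in range(height):
--         if 1 <= row <= height - 2:
--             board.append([1 if 1 <= col <= width - 2 else 0 for col in range(width)])
--         else:
--             board.append([0] * width)
--     return board
-- ===== Notes on version B (the rewrite author's own statement) =====
-- stated objective: simpler
-- what changed: B builds each row directly in one pass (interior cells 1, border cells 0) instead of allocating an all-zero board and then overwriting its interior with a second nested mutation pass.
import Mathlib
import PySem

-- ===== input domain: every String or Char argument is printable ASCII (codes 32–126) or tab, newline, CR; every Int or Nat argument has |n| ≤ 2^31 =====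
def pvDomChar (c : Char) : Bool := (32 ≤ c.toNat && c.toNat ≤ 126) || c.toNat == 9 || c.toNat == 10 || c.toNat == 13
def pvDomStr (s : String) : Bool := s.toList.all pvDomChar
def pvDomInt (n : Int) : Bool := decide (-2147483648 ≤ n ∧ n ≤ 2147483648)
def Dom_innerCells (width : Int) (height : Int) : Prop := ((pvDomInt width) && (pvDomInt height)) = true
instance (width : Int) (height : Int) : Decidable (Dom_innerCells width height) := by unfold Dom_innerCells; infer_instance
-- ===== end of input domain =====

-- B builds each row directly in a single pass (interior cells 1, border 0) instead of
-- allocating a zero board and overwriting its interior in a second mutation pass; objective: simpler.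


-- ===== PORT A =====
-- row = []; for col in range(width): row += [0]
def createOneRow (width : Int) : List Int :=
  (PySem.List.pyRange 0 width 1).foldl (fun row _ => row ++ [(0 : Int)]) []

-- arr = []; for row in range(height): arr += [createOneRow(width)]
def createBoard (width : Int) (height : Int) : List (List Int) :=
  (PySem.List.pyRange 0 height 1).foldl (fun arr _ => arr ++ [createOneRow width]) []

-- A[row][col] = v  (indices are always valid non-negative here; pySetD/pyGetD are exact there)
def innerCells (width : Int) (height : Int) : List (List Int) :=
  (PySem.List.pyRange 1 (height - 1) 1).foldl
    (fun A row =>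
      (PySem.List.pyRange 1 (width - 1) 1).foldl
        (fun A col =>
          if 1 ≤ row ∧ row ≤ height - 1 then
            PySem.List.pySetD A row (PySem.List.pySetD (PySem.List.pyGetD A row []) col 1)
          else
            PySem.List.pySetD A row (PySem.List.pySetD (PySem.List.pyGetD A row []) col 0))
        A)
    (createBoard width height)

-- ===== PORT B =====
def innerCells_alt (width : Int) (height : Int) : List (List Int) :=
  (PySem.List.pyRange 0 height 1).foldl
    (fun board row =>
      if 1 ≤ row ∧ row ≤ height - 2 then
        board ++ [(PySem.List.pyRange 0 width 1).map
          (fun col => if 1 ≤ col ∧ col ≤ width - 2 then (1 : Int) else 0)]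
      else
        board ++ [List.replicate width.toNat (0 : Int)])  -- [0]*width
    []

-- ===== PRECONDITION & SPEC =====
def Spec_innerCells (width : Int) (height : Int) (out : List (List Int)) : Prop := out = innerCells_alt width height
instance (width : Int) (height : Int) (out : List (List Int)) : Decidable (Spec_innerCells width height out) := by unfold Spec_innerCells; infer_instance

-- ===== CLAIM (what is proved, stated in full; the proofs are below) =====
def Claim_equal_innerCells : Prop := ∀ (width : Int) (height : Int), Dom_innerCells width height → Spec_innerCells width height (innerCells width height)

-- ===== LEMMAS AND PROOFS =====

theorem createOneRow_eq (w : Int) : createOneRow w = List.replicate w.toNat 0 := by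
  unfold createOneRow
  rw [PySem.List.foldl_append_singleton_eq_map (fun _ => (0 : Int))]
  apply List.ext_getElem?
  intro j
  simp [List.getElem?_replicate]

theorem createBoard_eq (w h : Int) :
    createBoard w h = List.replicate h.toNat (List.replicate w.toNat 0) := by
  unfold createBoard
  rw [PySem.List.foldl_append_singleton_eq_map (fun _ => createOneRow w)]
  apply List.ext_getElem?
  intro j
  simp [List.getElem?_replicate, createOneRow_eq]

-- setting to a constant at a list of valid indices, read out elementwise
theorem foldl_setD_const_getElem? {α : Type} (v : α) (idxs : List Int) (xs : List α) (j : Nat)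
    (h : ∀ i ∈ idxs, 0 ≤ i ∧ i.toNat < xs.length) :
    (idxs.foldl (fun ys i => PySem.List.pySetD ys i v) xs)[j]? =
      if ∃ i ∈ idxs, i.toNat = j then some v else xs[j]? := by
  induction idxs generalizing xs with
  | nil => simp
  | cons i idxs ih =>
    obtain ⟨hi0, hil⟩ := h i (List.mem_cons_self ..)
    rw [List.foldl_cons, PySem.List.pySetD_of_nonneg xs v hi0,
        ih (xs.set i.toNat v) (fun i' hi' => by
          have := h i' (List.mem_cons_of_mem _ hi'); simpa using this)]
    by_cases hj : ∃ i' ∈ idxs, i'.toNat = j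
    · rw [if_pos hj, if_pos (let ⟨i', hm, he⟩ := hj; ⟨i', List.mem_cons_of_mem _ hm, he⟩)]
    · rw [if_neg hj, List.getElem?_set]
      by_cases hij : i.toNat = j
      · rw [if_pos hij, if_pos hil, if_pos (⟨i, List.mem_cons_self .., hij⟩ :
          ∃ i' ∈ (i :: idxs), i'.toNat = j)]
      · rw [if_neg hij, if_neg]
        rintro ⟨i', hi', hji'⟩
        rcases List.mem_cons.mp hi' with rfl | hm
        · exact hij hji'
        · exact hj ⟨i', hm, hji'⟩

-- the nested assignment A[row][col] = 1 factored: the inner column loop only rewrites row r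
theorem inner_fold_board (cols : List Int) (A : List (List Int)) (r : Int) (h0 : 0 ≤ r) :
    cols.foldl (fun A c => PySem.List.pySetD A r (PySem.List.pySetD (PySem.List.pyGetD A r []) c 1)) A
      = PySem.List.pySetD A r
          (cols.foldl (fun R c => PySem.List.pySetD R c (1 : Int)) (PySem.List.pyGetD A r [])) := by
  by_cases hr : r.toNat < A.length
  · induction cols generalizing A with
    | nil =>
      rw [List.foldl_nil, List.foldl_nil, PySem.List.pySetD_of_nonneg _ _ h0,
          PySem.List.pyGetD_of_nonneg _ _ h0]
      have hsome : A[r.toNat]? = some (A.getD r.toNat []) := by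
        rw [List.getD_eq_getElem _ _ hr, List.getElem?_eq_getElem hr]
      apply List.ext_getElem?
      intro k
      rw [List.getElem?_set]
      by_cases hk : r.toNat = k
      · rw [if_pos hk, if_pos (hk ▸ hr), ← hk, hsome]
      · rw [if_neg hk]
    | cons c cols ih =>
      rw [List.foldl_cons, List.foldl_cons]
      rw [ih (PySem.List.pySetD A r (PySem.List.pySetD (PySem.List.pyGetD A r []) c 1))
            (by simpa [PySem.List.length_pySetD] using hr)]
      simp only [PySem.List.pySetD_of_nonneg _ _ h0, PySem.List.pyGetD_of_nonneg _ _ h0]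
      rw [List.getD_eq_getElem _ _ (by simpa using hr)]
      simp [List.getElem_set_self, hr, List.set_set]
  · -- r is out of range: every step is the identity
    have hA : PySem.List.pyGetD A r [] = [] := by
      rw [PySem.List.pyGetD_of_nonneg _ _ h0, List.getD_eq_getElem?_getD]
      simp [List.getElem?_eq_none (by omega : A.length ≤ r.toNat)]
    have hnil : ∀ (l : List Int), l.foldl (fun R c => PySem.List.pySetD R c (1 : Int)) [] = [] := by
      intro l
      induction l with
      | nil => rfl
      | cons c l ih =>
        have : PySem.List.pySetD ([] : List Int) c 1 = [] :=
          List.eq_nil_of_length_eq_zero (by simp [PySem.List.length_pySetD])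
        simp [this, ih]
    have hid : PySem.List.pySetD A r ([] : List Int) = A := by
      rw [PySem.List.pySetD_of_nonneg _ _ h0]
      exact List.set_eq_of_length_le (by omega)
    have hloop : ∀ (l : List Int),
        l.foldl (fun A c => PySem.List.pySetD A r (PySem.List.pySetD (PySem.List.pyGetD A r []) c 1)) A = A := by
      intro l
      induction l with
      | nil => rfl
      | cons c l ih =>
        have h1 : PySem.List.pySetD (PySem.List.pyGetD A r []) c 1 = [] := by
          rw [hA]; exact List.eq_nil_of_length_eq_zero (by simp [PySem.List.length_pySetD])
        simpa [h1, hid] using ih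
    rw [hloop, hA, hnil, hid]

-- one row-rewriting pass over distinct valid row indices, read out elementwise
theorem foldl_setrow_getElem? (f : List Int → List Int) (idxs : List Int) (B : List (List Int)) (j : Nat)
    (h : ∀ i ∈ idxs, 0 ≤ i ∧ i.toNat < B.length) (hnd : idxs.Nodup) :
    (idxs.foldl (fun B i => PySem.List.pySetD B i (f (PySem.List.pyGetD B i []))) B)[j]? =
      if ∃ i ∈ idxs, i.toNat = j then some (f (B.getD j [])) else B[j]? := by
  induction idxs generalizing B with
  | nil => simp
  | cons i idxs ih =>
    obtain ⟨hi0, hil⟩ := h i (List.mem_cons_self ..)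
    rw [List.foldl_cons, PySem.List.pySetD_of_nonneg _ _ hi0, PySem.List.pyGetD_of_nonneg _ _ hi0,
        ih (B.set i.toNat (f (B.getD i.toNat []))) (fun i' hi' => by
          have := h i' (List.mem_cons_of_mem _ hi'); simpa using this) hnd.of_cons]
    by_cases hij : i.toNat = j
    · have hnone : ¬ ∃ i' ∈ idxs, i'.toNat = j := by
        rintro ⟨i', hi', hji'⟩
        have hi'0 := (h i' (List.mem_cons_of_mem _ hi')).1
        have : i' = i := by omega
        exact (List.nodup_cons.mp hnd).1 (this ▸ hi')
      rw [if_neg hnone, List.getElem?_set, if_pos hij, if_pos hil,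
          if_pos (⟨i, List.mem_cons_self .., hij⟩ : ∃ i' ∈ (i :: idxs), i'.toNat = j), hij]
    · have hgd : (B.set i.toNat (f (B.getD i.toNat []))).getD j [] = B.getD j [] := by
        rw [List.getD_eq_getElem?_getD, List.getElem?_set, if_neg hij, List.getD_eq_getElem?_getD]
      have hge : (B.set i.toNat (f (B.getD i.toNat [])))[j]? = B[j]? := by
        rw [List.getElem?_set, if_neg hij]
      rw [hgd, hge]
      by_cases hj : ∃ i' ∈ idxs, i'.toNat = j
      · rw [if_pos hj, if_pos (let ⟨i', hm, he⟩ := hj; ⟨i', List.mem_cons_of_mem _ hm, he⟩)]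
      · rw [if_neg hj, if_neg]
        rintro ⟨i', hi', hji'⟩
        rcases List.mem_cons.mp hi' with rfl | hm
        · exact hij hji'
        · exact hj ⟨i', hm, hji'⟩

-- the column loop, as a function of the row it rewrites
def rowPass (w : Int) (R : List Int) : List Int :=
  (PySem.List.pyRange 1 (w - 1) 1).foldl (fun R c => PySem.List.pySetD R c (1 : Int)) R

-- the column loop turns the all-zero row into B's interior row
theorem rowfold_eq (w : Int) :
    rowPass w (List.replicate w.toNat 0)
      = (PySem.List.pyRange 0 w 1).map (fun c => if 1 ≤ c ∧ c ≤ w - 2 then (1 : Int) else 0) := by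
  unfold rowPass
  apply List.ext_getElem?
  intro j
  rw [foldl_setD_const_getElem? _ _ _ _
      (by intro c hc; rw [PySem.List.mem_pyRange_one] at hc
          simp only [List.length_replicate]; omega)]
  have hex : (∃ c ∈ PySem.List.pyRange 1 (w - 1) 1, c.toNat = j) ↔ 1 ≤ (j : Int) ∧ (j : Int) < w - 1 := by
    constructor
    · rintro ⟨c, hc, rfl⟩
      rw [PySem.List.mem_pyRange_one] at hc
      omega
    · rintro ⟨h1, h2⟩
      exact ⟨(j : Int), PySem.List.mem_pyRange_one.mpr ⟨h1, h2⟩, by simp⟩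
  rw [List.getElem?_map, PySem.List.getElem?_pyRange_one]
  by_cases hj : 1 ≤ (j : Int) ∧ (j : Int) < w - 1
  · rw [if_pos (hex.mpr hj), if_pos (show j < (w - 0).toNat by omega), Option.map_some,
        if_pos (show 1 ≤ (0 : Int) + j ∧ (0 : Int) + j ≤ w - 2 by omega)]
  · rw [if_neg (fun hc => hj (hex.mp hc)), List.getElem?_replicate]
    by_cases hw : j < w.toNat
    · rw [if_pos hw, if_pos (show j < (w - 0).toNat by omega), Option.map_some,
          if_neg (show ¬ (1 ≤ (0 : Int) + j ∧ (0 : Int) + j ≤ w - 2) by omega)]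
    · rw [if_neg hw, if_neg (show ¬ j < (w - 0).toNat by omega)]
      rfl

theorem innerCells_eq_alt (w h : Int) : innerCells w h = innerCells_alt w h := by
  -- simplify B to a map over the row range
  have hB : innerCells_alt w h =
      (PySem.List.pyRange 0 h 1).map (fun row =>
        if 1 ≤ row ∧ row ≤ h - 2 then
          (PySem.List.pyRange 0 w 1).map (fun c => if 1 ≤ c ∧ c ≤ w - 2 then (1 : Int) else 0)
        else List.replicate w.toNat 0) := by
    unfold innerCells_alt
    have hbody : ∀ (board : List (List Int)) (row : Int),
        (if 1 ≤ row ∧ row ≤ h - 2 then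
          board ++ [(PySem.List.pyRange 0 w 1).map (fun col => if 1 ≤ col ∧ col ≤ w - 2 then (1 : Int) else 0)]
        else board ++ [List.replicate w.toNat 0]) =
        board ++ [if 1 ≤ row ∧ row ≤ h - 2 then
          (PySem.List.pyRange 0 w 1).map (fun c => if 1 ≤ c ∧ c ≤ w - 2 then (1 : Int) else 0)
        else List.replicate w.toNat 0] := by
      intro board row; split_ifs <;> rfl
    simp only [hbody]
    rw [PySem.List.foldl_append_singleton_eq_map]
    simp
  -- simplify A: the inner condition is always true, the column loop rewrites one row
  have hA : innerCells w h =
      (PySem.List.pyRange 1 (h - 1) 1).foldl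
        (fun A row => PySem.List.pySetD A row (rowPass w (PySem.List.pyGetD A row [])))
        (createBoard w h) := by
    unfold innerCells
    apply PySem.List.foldl_congr_mem
    intro A row hrow
    rw [PySem.List.mem_pyRange_one] at hrow
    have hc : 1 ≤ row ∧ row ≤ h - 1 := by omega
    rw [PySem.List.foldl_congr_mem _ _
          (fun A col => PySem.List.pySetD A row (PySem.List.pySetD (PySem.List.pyGetD A row []) col 1)) _
          (fun acc x _ => by rw [if_pos hc])]
    exact inner_fold_board _ A row (by omega)
  rw [hA, hB]
  apply List.ext_getElem?
  intro j
  rw [foldl_setrow_getElem? (rowPass w) (PySem.List.pyRange 1 (h - 1) 1) (createBoard w h) j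
      (by intro r hr; rw [PySem.List.mem_pyRange_one] at hr
          refine ⟨by omega, ?_⟩
          rw [createBoard_eq]; simp only [List.length_replicate]; omega)
      (PySem.List.nodup_pyRange_one _ _)]
  have hex : (∃ r ∈ PySem.List.pyRange 1 (h - 1) 1, r.toNat = j) ↔ 1 ≤ (j : Int) ∧ (j : Int) < h - 1 := by
    constructor
    · rintro ⟨r, hr, rfl⟩
      rw [PySem.List.mem_pyRange_one] at hr
      omega
    · rintro ⟨h1, h2⟩
      exact ⟨(j : Int), PySem.List.mem_pyRange_one.mpr ⟨h1, h2⟩, by simp⟩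
  rw [List.getElem?_map, PySem.List.getElem?_pyRange_one, createBoard_eq]
  by_cases hj : 1 ≤ (j : Int) ∧ (j : Int) < h - 1
  · have hgd : (List.replicate h.toNat (List.replicate w.toNat (0 : Int))).getD j [] =
        List.replicate w.toNat 0 := by
      rw [List.getD_eq_getElem?_getD, List.getElem?_replicate, if_pos (show j < h.toNat by omega)]
      rfl
    rw [if_pos (hex.mpr hj), hgd, rowfold_eq, if_pos (show j < (h - 0).toNat by omega),
        Option.map_some, if_pos (show 1 ≤ (0 : Int) + j ∧ (0 : Int) + j ≤ h - 2 by omega)]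
  · rw [if_neg (fun hc => hj (hex.mp hc)), List.getElem?_replicate]
    by_cases hlt : j < h.toNat
    · rw [if_pos hlt, if_pos (show j < (h - 0).toNat by omega), Option.map_some,
          if_neg (show ¬ (1 ≤ (0 : Int) + j ∧ (0 : Int) + j ≤ h - 2) by omega)]
    · rw [if_neg hlt, if_neg (show ¬ j < (h - 0).toNat by omega)]
      rfl

-- ===== VERDICT (by name: the statement is the Claim_ definition above) =====
theorem innerCells_spec : Claim_equal_innerCells := by
  intro width height _
  unfold Spec_innerCells
  exact innerCells_eq_alt width height
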